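-- pv_equiv track=rewrite | github.com/ploomber/doc | misc/Voice-to-Text-to-Voice/voice_pipeline.py | filter_and_format_devices
-- ===== SOURCE A (Python) =====
-- def filter_and_format_devices(devices, device_type):
--     """Filter and format devices to show only the most relevant ones"""
--     if not devices:
--         return []
--
--     # Filter out duplicates and less relevant devices
--     filtered_devices = []
--     seen_names = set()
--
--     # Priority keywords for different device types
--     if device_type == "input":
--         priority_keywords = ["microphone", "mic", "cable output", "virtual", "input"]
--         skip_keywords = ["mapper", "primary", "driver"]
--     else:  # output
--         priority_keywords = ["speakers", "headphones", "cable input", "virtual", "output"]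
--         skip_keywords = ["mapper", "primary", "driver", "spdif"]
--
--     # First pass: collect priority devices
--     priority_devices = []
--     regular_devices = []
--
--     for idx, name, info in devices:
--         # Clean up the name
--         clean_name = name.lower().strip()
--
--         # Skip obvious duplicates
--         if clean_name in seen_names:
--             continue
--         seen_names.add(clean_name)
--
--         # Skip less useful devices
--         if any(skip in clean_name for skip in skip_keywords):
--             continue
--
--         # Shorten long names
--         display_name = name
--         if len(display_name) > 50:
--             display_name = display_name[:47] + "..."
--
--         device_entry = (idx, display_name, info)
--
--         # Check if it's a priority device
--         if any(keyword in clean_name for keyword in priority_keywords):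
--             priority_devices.append(device_entry)
--         else:
--             regular_devices.append(device_entry)
--
--     # Combine priority devices first, then regular ones (but limit total)
--     filtered_devices = priority_devices + regular_devices
--
--     # Limit to reasonable number
--     return filtered_devices[:10]
-- ===== SOURCE B (Python) =====
-- def filter_and_format_devices(devices, device_type):
--     """Staged pipeline: dedupe list, then filter, partition and format as separate passes."""
--     if device_type == "input":
--         priority_keywords = ["microphone", "mic", "cable output", "virtual", "input"]
--         skip_keywords = ["mapper", "primary", "driver"]
--     else:
--         priority_keywords = ["speakers", "headphones", "cable input", "virtual", "output"]
--         skip_keywords = ["mapper", "primary", "driver", "spdif"]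
--
--     def clean(d):
--         return d[1].lower().strip()
--
--     # stage 1: drop later duplicates (by cleaned name) by scanning what is already kept
--     uniq = []
--     for d in devices:
--         if clean(d) not in (clean(u) for u in uniq):
--             uniq.append(d)
--     # stage 2: drop skip-keyword devices
--     kept = [d for d in uniq if not any(s in clean(d) for s in skip_keywords)]
--     # stage 3: stable partition by priority, truncate
--     hi = [d for d in kept if any(k in clean(d) for k in priority_keywords)]
--     lo = [d for d in kept if not any(k in clean(d) for k in priority_keywords)]
--     chosen = (hi + lo)[:10]
--     # stage 4: format names
--     return [(i, n if len(n) <= 50 else n[:47] + "...", info) for i, n, info in chosen]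
-- ===== Notes on version B (the rewrite author's own statement) =====
-- stated objective: alternative
-- what changed: A does everything in one fold with a seen-set and two accumulator lists; B is a staged pipeline: a dedup pass that rescans the kept prefix instead of keeping a set, then separate filter, stable-partition, truncate and format passes.
import Mathlib
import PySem

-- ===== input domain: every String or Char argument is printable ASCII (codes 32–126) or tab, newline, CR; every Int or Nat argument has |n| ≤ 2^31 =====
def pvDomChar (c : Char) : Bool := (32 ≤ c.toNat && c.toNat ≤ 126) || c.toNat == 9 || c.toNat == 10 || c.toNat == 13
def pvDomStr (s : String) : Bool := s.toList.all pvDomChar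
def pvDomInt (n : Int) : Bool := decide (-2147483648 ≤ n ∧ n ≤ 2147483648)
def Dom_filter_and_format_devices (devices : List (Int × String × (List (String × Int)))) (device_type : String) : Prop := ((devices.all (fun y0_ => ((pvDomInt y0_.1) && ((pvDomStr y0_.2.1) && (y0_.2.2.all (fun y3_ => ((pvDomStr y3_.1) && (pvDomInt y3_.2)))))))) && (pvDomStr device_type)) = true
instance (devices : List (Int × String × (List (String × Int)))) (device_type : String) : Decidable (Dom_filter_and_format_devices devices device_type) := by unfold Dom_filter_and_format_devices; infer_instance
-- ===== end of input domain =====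

-- B replaces A's single fold (seen-set + two accumulators) by a staged pipeline:
-- dedup by rescanning the kept prefix, then filter / partition / truncate / format passes;
-- alternative decomposition, same return value.

-- shared helpers (identical expressions in both Python versions)
def pvPriKws (device_type : String) : List String :=
  if device_type = "input" then ["microphone", "mic", "cable output", "virtual", "input"]
  else ["speakers", "headphones", "cable input", "virtual", "output"]

def pvSkipKws (device_type : String) : List String :=
  if device_type = "input" then ["mapper", "primary", "driver"]
  else ["mapper", "primary", "driver", "spdif"]

-- name.lower().strip()
def pvClean (name : String) : String := PySem.Str.strip (PySem.Str.lower name)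

-- display_name = name; if len > 50: name[:47] + "..."  ('+' on str is exact list append on code points)
def pvDisplay (name : String) : String :=
  if 50 < PySem.Str.len name then String.ofList (PySem.List.slice name.toList none (some 47) ++ "...".toList)
  else name

-- any(kw in clean for kw in kws)
def pvAnyIn (kws : List String) (clean : String) : Bool := kws.any (fun k => PySem.Str.isIn k clean)

-- ===== PORT A =====
-- loop body of A: state (seen_names, priority_devices, regular_devices)
def pvStepA (skipK priK : List String)
    (st : PySem.Set String × List (Int × String × (List (String × Int))) × List (Int × String × (List (String × Int))))
    (d : Int × String × (List (String × Int))) :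
    PySem.Set String × List (Int × String × (List (String × Int))) × List (Int × String × (List (String × Int))) :=
  let clean := pvClean d.2.1
  if PySem.Set.contains st.1 clean then st
  else
    let seen' := PySem.Set.add st.1 clean
    if pvAnyIn skipK clean then (seen', st.2.1, st.2.2)
    else
      let e := (d.1, pvDisplay d.2.1, d.2.2)
      if pvAnyIn priK clean then (seen', st.2.1 ++ [e], st.2.2)
      else (seen', st.2.1, st.2.2 ++ [e])

def filter_and_format_devices (devices : List (Int × String × (List (String × Int)))) (device_type : String) : List (Int × String × (List (String × Int))) :=
  match devices with
  | [] => []   -- if not devices: return []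
  | _ :: _ =>
    let skipK := pvSkipKws device_type
    let priK := pvPriKws device_type
    let st := devices.foldl (pvStepA skipK priK) (PySem.Set.empty, [], [])
    (st.2.1 ++ st.2.2).take 10   -- [:10] on a nonnegative literal bound = take 10

-- ===== PORT B =====
-- clean(d) for a device tuple
def pvCleanD (d : Int × String × (List (String × Int))) : String := pvClean d.2.1

-- stage-1 loop body: keep d unless its clean name already occurs among the kept devices
def pvDedupStep (u : List (Int × String × (List (String × Int)))) (d : Int × String × (List (String × Int))) :
    List (Int × String × (List (String × Int))) :=
  if (u.map pvCleanD).contains (pvCleanD d) then u else u ++ [d]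

def pvKeepF (skipK : List String) (d : Int × String × (List (String × Int))) : Bool := !(pvAnyIn skipK (pvCleanD d))
def pvPriF (priK : List String) (d : Int × String × (List (String × Int))) : Bool := pvAnyIn priK (pvCleanD d)
-- stage-4 formatting of one tuple
def pvFmt (d : Int × String × (List (String × Int))) : Int × String × (List (String × Int)) :=
  (d.1, pvDisplay d.2.1, d.2.2)

def filter_and_format_devices_alt (devices : List (Int × String × (List (String × Int)))) (device_type : String) : List (Int × String × (List (String × Int))) :=
  let priK := pvPriKws device_type
  let skipK := pvSkipKws device_type
  let uniq := devices.foldl pvDedupStep []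
  let kept := uniq.filter (pvKeepF skipK)
  let hi := kept.filter (pvPriF priK)
  let lo := kept.filter (fun d => !(pvPriF priK d))
  ((hi ++ lo).take 10).map pvFmt

-- ===== PRECONDITION & SPEC =====
def Spec_filter_and_format_devices (devices : List (Int × String × (List (String × Int)))) (device_type : String) (out : List (Int × String × (List (String × Int)))) : Prop := out = filter_and_format_devices_alt devices device_type
instance (devices : List (Int × String × (List (String × Int)))) (device_type : String) (out : List (Int × String × (List (String × Int)))) : Decidable (Spec_filter_and_format_devices devices device_type out) := by unfold Spec_filter_and_format_devices; infer_instance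

-- ===== CLAIM =====
def Claim_equal_filter_and_format_devices : Prop := ∀ (devices : List (Int × String × (List (String × Int)))) (device_type : String), Dom_filter_and_format_devices devices device_type → Spec_filter_and_format_devices devices device_type (filter_and_format_devices devices device_type)

-- ===== LEMMAS AND PROOFS =====

-- the devices stage 1 newly appends when started from prefix u
def pvDedupAux (l u : List (Int × String × (List (String × Int)))) : List (Int × String × (List (String × Int))) :=
  match l with
  | [] => []
  | d :: t =>
    if (u.map pvCleanD).contains (pvCleanD d) then pvDedupAux t u
    else d :: pvDedupAux t (u ++ [d])

theorem pv_foldl_dedup (l : List (Int × String × (List (String × Int)))) :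
    ∀ u, l.foldl pvDedupStep u = u ++ pvDedupAux l u := by
  induction l with
  | nil => intro u; simp [pvDedupAux]
  | cons d t ih =>
    intro u
    rw [List.foldl_cons]
    by_cases h : (u.map pvCleanD).contains (pvCleanD d) = true
    · rw [show pvDedupStep u d = u from by simp only [pvDedupStep]; rw [if_pos h],
          ih u,
          show pvDedupAux (d :: t) u = pvDedupAux t u from by
            simp only [pvDedupAux]; rw [if_pos h]]
    · rw [show pvDedupStep u d = u ++ [d] from by simp only [pvDedupStep]; rw [if_neg h],
          show pvDedupAux (d :: t) u = d :: pvDedupAux t (u ++ [d]) from by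
            simp only [pvDedupAux]; rw [if_neg h],
          ih (u ++ [d])]
      simp

-- A's fold, started from a seen-set with the same members as the clean names of prefix u,
-- appends exactly the formatted priority/regular parts of the new unique devices
theorem pv_loop_corr (skipK priK : List String) (l : List (Int × String × (List (String × Int)))) :
    ∀ (seen : PySem.Set String) (u : List (Int × String × (List (String × Int))))
      (P R : List (Int × String × (List (String × Int)))),
      (∀ c, PySem.Set.contains seen c = (u.map pvCleanD).contains c) →
      (l.foldl (pvStepA skipK priK) (seen, P, R)).2 =
        (P ++ (((pvDedupAux l u).filter (pvKeepF skipK)).filter (pvPriF priK)).map pvFmt,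
         R ++ (((pvDedupAux l u).filter (pvKeepF skipK)).filter (fun d => !(pvPriF priK d))).map pvFmt) := by
  induction l with
  | nil => intro seen u P R _; simp [pvDedupAux]
  | cons d t ih =>
    intro seen u P R H
    rw [List.foldl_cons]
    by_cases h : (u.map pvCleanD).contains (pvCleanD d) = true
    · have hs : PySem.Set.contains seen (pvClean d.2.1) = true := by
        rw [H (pvClean d.2.1)]; exact h
      rw [show pvStepA skipK priK (seen, P, R) d = (seen, P, R) from by
            simp only [pvStepA]; rw [if_pos hs],
          show pvDedupAux (d :: t) u = pvDedupAux t u from by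
            simp only [pvDedupAux]; rw [if_pos h]]
      exact ih seen u P R H
    · have hs : ¬ PySem.Set.contains seen (pvClean d.2.1) = true := by
        rw [H (pvClean d.2.1)]; exact h
      have hadd : PySem.Set.add seen (pvClean d.2.1) = seen ++ [pvClean d.2.1] :=
        PySem.Set.add_of_not_mem (by
          intro hm
          exact hs ((PySem.Set.contains_iff seen (pvClean d.2.1)).mpr hm))
      have H' : ∀ c, PySem.Set.contains (PySem.Set.add seen (pvClean d.2.1)) c
          = ((u ++ [d]).map pvCleanD).contains c := by
        intro c
        rw [hadd]
        simp only [PySem.Set.contains_eq_listContains, List.map_append, List.map_cons,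
          List.map_nil, List.contains_append] at H ⊢
        rw [H c]
        rfl
      rw [show pvDedupAux (d :: t) u = d :: pvDedupAux t (u ++ [d]) from by
            simp only [pvDedupAux]; rw [if_neg h]]
      by_cases hskip : pvAnyIn skipK (pvClean d.2.1) = true
      · have hk : pvKeepF skipK d = false := by simp [pvKeepF, pvCleanD, hskip]
        rw [show pvStepA skipK priK (seen, P, R) d
              = (PySem.Set.add seen (pvClean d.2.1), P, R) from by
            simp only [pvStepA]; rw [if_neg hs, if_pos hskip],
          ih _ (u ++ [d]) P R H']
        simp [hk]
      · have hk : pvKeepF skipK d = true := by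
          simp [pvKeepF, pvCleanD]; simpa using hskip
        by_cases hpri : pvAnyIn priK (pvClean d.2.1) = true
        · have hp : pvPriF priK d = true := by simp [pvPriF, pvCleanD, hpri]
          rw [show pvStepA skipK priK (seen, P, R) d
                = (PySem.Set.add seen (pvClean d.2.1), P ++ [(d.1, pvDisplay d.2.1, d.2.2)], R) from by
              simp only [pvStepA]; rw [if_neg hs, if_neg (by simpa [Bool.not_eq_true] using hskip : ¬ pvAnyIn skipK (pvClean d.2.1) = true), if_pos hpri],
            ih _ (u ++ [d]) _ _ H']
          simp [hk, hp, pvFmt, List.append_assoc]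
        · have hp : pvPriF priK d = false := by
            simp [pvPriF, pvCleanD]; simpa using hpri
          rw [show pvStepA skipK priK (seen, P, R) d
                = (PySem.Set.add seen (pvClean d.2.1), P, R ++ [(d.1, pvDisplay d.2.1, d.2.2)]) from by
              simp only [pvStepA]; rw [if_neg hs, if_neg hskip, if_neg hpri],
            ih _ (u ++ [d]) _ _ H']
          simp [hk, hp, pvFmt, List.append_assoc]

-- ===== VERDICT =====
theorem filter_and_format_devices_spec : Claim_equal_filter_and_format_devices := by
  unfold Claim_equal_filter_and_format_devices
  intro devices device_type _
  unfold Spec_filter_and_format_devices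
  cases devices with
  | nil => simp [filter_and_format_devices, filter_and_format_devices_alt]
  | cons d t =>
    simp only [filter_and_format_devices, filter_and_format_devices_alt]
    have h := pv_loop_corr (pvSkipKws device_type) (pvPriKws device_type) (d :: t)
      PySem.Set.empty [] [] [] (by intro c; simp [PySem.Set.empty, PySem.Set.contains])
    rw [pv_foldl_dedup]
    rw [Prod.ext_iff] at h
    simp only [List.nil_append] at h ⊢
    rw [h.1, h.2, List.map_take, List.map_append]
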